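-- pv_equiv track=rewrite | github.com/GeorgeKuzora/grafite-translator | main.py | transform_text
-- ===== SOURCE A (Python) =====
-- from enum import StrEnum
--
-- class InputKey(StrEnum):
--     a = "a"
--     b = "b"
--     c = "c"
--     d = "d"
--     e = "e"
--     f = "f"
--     g = "g"
--     h = "h"
--     i = "i"
--     j = "j"
--     k = "k"
--     l = "l"
--     m = "m"
--     n = "n"
--     o = "o"
--     p = "p"
--     q = "q"
--     r = "r"
--     s = "s"
--     t = "t"
--     u = "u"
--     v = "v"
--     w = "w"
--     x = "x"
--     y = "y"
--     z = "z"
--     A = "A"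
--     B = "B"
--     C = "C"
--     D = "D"
--     E = "E"
--     F = "F"
--     G = "G"
--     H = "H"
--     I = "I"
--     J = "J"
--     K = "K"
--     L = "L"
--     M = "M"
--     N = "N"
--     O = "O"
--     P = "P"
--     Q = "Q"
--     R = "R"
--     S = "S"
--     T = "T"
--     U = "U"
--     V = "V"
--     W = "W"
--     X = "X"
--     Y = "Y"
--     Z = "Z"
--     dot = "."
--     comma = ","
--     semicolon = ";"
--     colon = ":"
--     dash = "-"
--     underscore = "_"
--     quote = "'"
--     double_quote = '"'
--     slash = "/"
--     angle_bracket_left = "<"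
--     angle_bracket_right = ">"
--     question_mark = "?"
--     undefined = ""
--
-- def transform_text(text: str, keymap: dict[InputKey, str]) -> str:
--     output = ""
--     for char in text:
--         if char in keymap:
--             output += keymap[char]
--         else:
--             output += char
--     return output
-- ===== SOURCE B (Python) =====
-- def transform_text(text: str, keymap: dict) -> str:
--     def go(i: int, j: int) -> str:
--         if j - i <= 1:
--             if j - i == 0:
--                 return ""
--             c = text[i]
--             return keymap.get(c, c)
--         m = (i + j) // 2
--         return go(i, m) + go(m, j)
--     return go(0, len(text))
-- ===== Notes on version B (the rewrite author's own statement) =====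
-- stated objective: alternative
-- what changed: Replaces A's left-to-right accumulator loop with branch tests by a divide-and-conquer recursion: split the index range in half, recurse on each half, and concatenate, with the per-character keymap.get lookup only at the single-character base case.
import Mathlib
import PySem

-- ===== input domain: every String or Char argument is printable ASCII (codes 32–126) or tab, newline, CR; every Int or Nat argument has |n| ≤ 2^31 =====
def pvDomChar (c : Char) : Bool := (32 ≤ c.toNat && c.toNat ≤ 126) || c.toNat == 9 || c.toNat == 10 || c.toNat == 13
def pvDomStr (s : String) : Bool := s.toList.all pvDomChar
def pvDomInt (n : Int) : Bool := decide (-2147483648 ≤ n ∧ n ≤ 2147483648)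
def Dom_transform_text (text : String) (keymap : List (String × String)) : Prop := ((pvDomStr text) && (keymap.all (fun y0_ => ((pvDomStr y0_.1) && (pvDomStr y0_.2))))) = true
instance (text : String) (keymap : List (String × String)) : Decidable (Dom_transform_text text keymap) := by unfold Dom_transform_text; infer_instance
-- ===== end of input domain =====

-- B is an alternative decomposition: divide-and-conquer recursion over index ranges instead of A's left-to-right accumulator loop; return value proved equal to A's on Dom.
-- ===== PORT A =====
-- output = ""; for char in text: output += keymap[char] if char in keymap else char
def transform_text (text : String) (keymap : List (String × String)) : String :=
  let d : PySem.Dict String String := PySem.Dict.mk keymap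
  String.ofList (text.toList.foldl (fun out c =>
    if d.contains (String.ofList [c]) then out ++ (d.getD (String.ofList [c]) "").toList
    else out ++ [c]) [])

-- ===== PORT B =====
-- def go(i, j): if j - i <= 1: "" when empty, else keymap.get(text[i], text[i]); else split at m = (i+j)//2 and concatenate
def pvGo (chars : List Char) (km : PySem.Dict String String) (i j : Nat) : List Char :=
  if _h : j - i ≤ 1 then
    if j - i = 0 then []
    else
      let c := PySem.List.pyGetD chars (i : Int) ' '   -- text[i]; i is always in range when called from transform_text
      ((km.get? (String.ofList [c])).getD (String.ofList [c])).toList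
  else
    let m := (i + j) / 2
    pvGo chars km i m ++ pvGo chars km m j
termination_by j - i
decreasing_by all_goals omega

-- return go(0, len(text))
def transform_text_alt (text : String) (keymap : List (String × String)) : String :=
  String.ofList (pvGo text.toList (PySem.Dict.mk keymap) 0 text.toList.length)

-- ===== PRECONDITION & SPEC =====
def Spec_transform_text (text : String) (keymap : List (String × String)) (out : String) : Prop := out = transform_text_alt text keymap
instance (text : String) (keymap : List (String × String)) (out : String) : Decidable (Spec_transform_text text keymap out) := by unfold Spec_transform_text; infer_instance

-- ===== CLAIM (what is proved, stated in full; the proofs are below) =====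
def Claim_equal_transform_text : Prop := ∀ (text : String) (keymap : List (String × String)), Dom_transform_text text keymap → Spec_transform_text text keymap (transform_text text keymap)

-- ===== LEMMAS AND PROOFS =====

-- the per-character replacement both programs perform
def pvRep (km : PySem.Dict String String) (c : Char) : List Char :=
  ((km.get? (String.ofList [c])).getD (String.ofList [c])).toList

-- B's divide-and-conquer over a range computes the flatMap of the replacement over that segment
theorem pvGo_eq_flatMap (chars : List Char) (km : PySem.Dict String String) :
    ∀ n i j, j - i ≤ n → j ≤ chars.length →
      pvGo chars km i j = ((chars.drop i).take (j - i)).flatMap (pvRep km) := by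
  intro n
  induction n with
  | zero =>
    intro i j hn _
    rw [pvGo]
    simp [Nat.le_zero.mp hn]
  | succ n ih =>
    intro i j hn hj
    rw [pvGo]
    by_cases h1 : j - i ≤ 1
    · by_cases h0 : j - i = 0
      · simp [h0]
      · have hji : j - i = 1 := by omega
        have hi : i < chars.length := by omega
        simp only [hji]
        rw [dif_pos (le_refl 1), if_neg one_ne_zero]
        rw [PySem.List.pyGetD_natCast]
        have hd : chars.drop i = chars[i] :: chars.drop (i + 1) := List.drop_eq_getElem_cons hi
        have hg : chars.getD i ' ' = chars[i] := List.getD_eq_getElem chars ' ' hi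
        rw [hg, hd]
        simp only [List.take_succ_cons, List.take_zero, List.flatMap_cons, List.flatMap_nil,
          List.append_nil, pvRep]
    · have h2 : 2 ≤ j - i := by omega
      simp only [h1, dif_neg, not_false_iff]
      obtain ⟨m, hmdef⟩ : ∃ m, (i + j) / 2 = m := ⟨_, rfl⟩
      rw [hmdef]
      have hdm : 2 * m + (i + j) % 2 = i + j := by rw [← hmdef]; exact Nat.div_add_mod (i + j) 2
      have hmod : (i + j) % 2 < 2 := Nat.mod_lt _ (by omega)
      have hlo : i < m := by omega
      have hhi : m < j := by omega
      rw [ih i m (by omega) (by omega), ih m j (by omega) hj]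
      have hsplit : (chars.drop i).take (j - i)
          = (chars.drop i).take (m - i) ++ (chars.drop m).take (j - m) := by
        have hsum : j - i = (m - i) + (j - m) := by omega
        rw [hsum, List.take_add, List.drop_drop]
        have hix : i + (m - i) = m := by omega
        rw [hix]
      rw [hsplit, List.flatMap_append]

-- A's if/else body is exactly the replacement
theorem step_eq (km : PySem.Dict String String) (c : Char) :
    (if km.contains (String.ofList [c]) then (km.getD (String.ofList [c]) "").toList else [c])
      = pvRep km c := by
  unfold pvRep
  rw [PySem.Dict.contains_eq_isSome_get?, PySem.Dict.getD_eq_get?_getD]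
  cases km.get? (String.ofList [c]) <;> simp

-- accumulator-append fold is flatMap of the per-element pieces
theorem foldl_acc (xs : List Char) (g : Char → List Char) (acc : List Char) :
    xs.foldl (fun out c => out ++ g c) acc = acc ++ xs.flatMap g := by
  induction xs generalizing acc with
  | nil => simp
  | cons x t ih => simp [List.foldl_cons, ih, List.append_assoc]

-- ===== VERDICT (by name: the statement is the Claim_ definition above) =====
theorem transform_text_spec : Claim_equal_transform_text := by
  intro text keymap _
  unfold Spec_transform_text transform_text transform_text_alt
  rw [pvGo_eq_flatMap text.toList (PySem.Dict.mk keymap) text.toList.length 0 text.toList.length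
      (by omega) (le_refl _)]
  simp only [List.drop_zero, Nat.sub_zero, List.take_length]
  have : (fun (out : List Char) (c : Char) =>
      if (PySem.Dict.mk keymap).contains (String.ofList [c]) then
        out ++ ((PySem.Dict.mk keymap).getD (String.ofList [c]) "").toList
      else out ++ [c])
      = (fun out c => out ++ pvRep (PySem.Dict.mk keymap) c) := by
    funext out c
    rw [← step_eq (PySem.Dict.mk keymap) c]
    split <;> rfl
  rw [this, foldl_acc]
  simp
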